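-- pv_equiv track=rewrite | github.com/RomanAILabs-Auth/Neural | nrlpy/src/nrlpy/nrl_ai_compose.py | _build_transition_index
-- ===== SOURCE A (Python) =====
-- def _build_transition_index(
--     transitions: dict[tuple[int, int], int],
-- ) -> dict[int, list[tuple[int, int]]]:
--     """src -> [(dst, count), ...] sorted by ``(desc count, asc dst)``."""
--     out: dict[int, list[tuple[int, int]]] = {}
--     for (src, dst), count in transitions.items():
--         out.setdefault(src, []).append((dst, count))
--     for lst in out.values():
--         lst.sort(key=lambda x: (-x[1], x[0]))
--     return out
-- ===== SOURCE B (Python) =====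
-- def _build_transition_index(
--     transitions: dict[tuple[int, int], int],
-- ) -> dict[int, list[tuple[int, int]]]:
--     """src -> [(dst, count), ...] sorted by ``(desc count, asc dst)``."""
--     # One global stable sort by (-count, dst); stability keeps every
--     # per-source bucket already in (desc count, asc dst) order, so no
--     # per-group sort is needed.
--     ordered = sorted(transitions.items(), key=lambda kv: (-kv[1], kv[0][1]))
--     buckets: dict[int, list[tuple[int, int]]] = {}
--     for (src, dst), count in ordered:
--         buckets.setdefault(src, []).append((dst, count))
--     # present the keys in first-appearance order of the input
--     return {src: buckets[src] for src in dict.fromkeys(src for (src, _dst) in transitions)}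
-- ===== Notes on version B (the rewrite author's own statement) =====
-- stated objective: alternative
-- what changed: Replaces A's per-source bucket sorts with ONE global stable sort of all transitions by (-count, dst) followed by a single bucketing pass, relying on sort stability to leave each bucket already ordered; key order is restored to first appearance.
import Mathlib
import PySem

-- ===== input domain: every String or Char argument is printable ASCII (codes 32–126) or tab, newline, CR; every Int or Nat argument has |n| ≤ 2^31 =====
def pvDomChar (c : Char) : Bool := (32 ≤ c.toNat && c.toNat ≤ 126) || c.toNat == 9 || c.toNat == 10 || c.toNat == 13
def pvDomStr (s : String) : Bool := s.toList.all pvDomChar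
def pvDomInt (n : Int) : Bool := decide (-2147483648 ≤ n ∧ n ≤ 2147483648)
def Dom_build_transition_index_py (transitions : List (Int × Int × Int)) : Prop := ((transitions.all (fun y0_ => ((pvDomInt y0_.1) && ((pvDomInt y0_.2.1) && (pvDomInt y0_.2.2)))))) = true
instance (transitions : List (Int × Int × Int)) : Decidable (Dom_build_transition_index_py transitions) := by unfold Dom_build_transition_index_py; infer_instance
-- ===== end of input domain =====

-- B replaces A's per-source bucket sorts with one global stable sort plus a single
-- bucketing pass (alternative decomposition, same asymptotic cost). Return-value
-- equivalence only: A sorts its buckets in place (not observable through the return).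

-- ===== PORT A =====
-- transitions item (src, dst, count) stands for the dict item ((src, dst), count).
def build_transition_index_py (transitions : List (Int × Int × Int)) : List (Int × List (Int × Int)) :=
  -- out.setdefault(src, []).append((dst, count))  ==  modify src [] (· ++ [(dst, count)])
  let out := transitions.foldl (fun d p => d.modify p.1 [] (· ++ [p.2])) PySem.Dict.empty
  -- for lst in out.values(): lst.sort(key=lambda x: (-x[1], x[0]))
  out.items.map (fun q => (q.1, PySem.List.sorted2 q.2 (fun x => -x.2) (fun x => x.1)))

-- ===== PORT B =====
def build_transition_index_py_alt (transitions : List (Int × Int × Int)) : List (Int × List (Int × Int)) :=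
  -- ordered = sorted(transitions.items(), key=lambda kv: (-kv[1], kv[0][1]))
  let ordered := PySem.List.sorted2 transitions (fun t => -t.2.2) (fun t => t.2.1)
  -- buckets.setdefault(src, []).append((dst, count))
  let buckets := ordered.foldl (fun d p => d.modify p.1 [] (· ++ [p.2])) PySem.Dict.empty
  -- {src: buckets[src] for src in dict.fromkeys(src for (src, _dst) in transitions)}
  (PySem.List.dedup (transitions.map (·.1))).map (fun s => (s, buckets.getD s []))

-- ===== PRECONDITION & SPEC =====
-- A's argument is a dict keyed by (src, dst): Pre_ excludes association lists with a
-- repeated (src, dst) key, which no dict argument of A can produce.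
def Pre_build_transition_index_py (transitions : List (Int × Int × Int)) : Prop :=
  (transitions.map (fun t => (t.1, t.2.1))).Nodup
instance (transitions : List (Int × Int × Int)) : Decidable (Pre_build_transition_index_py transitions) := by unfold Pre_build_transition_index_py; infer_instance
def pvWitness_build_transition_index_py : (List (Int × Int × Int)) := ([(1, 2, 3), (1, 0, 3), (2, 2, 1)])
def Spec_build_transition_index_py (transitions : List (Int × Int × Int)) (out : List (Int × List (Int × Int))) : Prop := out = build_transition_index_py_alt transitions
instance (transitions : List (Int × Int × Int)) (out : List (Int × List (Int × Int))) : Decidable (Spec_build_transition_index_py transitions out) := by unfold Spec_build_transition_index_py; infer_instance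

-- ===== CLAIM (what is proved, stated in full; the proofs are below) =====
def Claim_equal_build_transition_index_py : Prop := ∀ (transitions : List (Int × Int × Int)), Dom_build_transition_index_py transitions → Pre_build_transition_index_py transitions → Spec_build_transition_index_py transitions (build_transition_index_py transitions)

-- ===== LEMMAS AND PROOFS =====

theorem pv_insertBy_map {α β : Type} (bf : α → α → Bool) (bf' : β → β → Bool) (f : α → β)
    (h : ∀ a b, bf a b = bf' (f a) (f b)) (x : α) (ys : List α) :
    (PySem.List.insertBy bf x ys).map f = PySem.List.insertBy bf' (f x) (ys.map f) := by
  induction ys with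
  | nil => rfl
  | cons y ys ih =>
      simp only [PySem.List.insertBy, List.map_cons, ← h]
      by_cases hb : bf x y = true
      · simp [hb]
      · simp [hb, ih]

theorem pv_foldl_insertBy_map {α β : Type} (bf : α → α → Bool) (bf' : β → β → Bool) (f : α → β)
    (h : ∀ a b, bf a b = bf' (f a) (f b)) :
    ∀ (xs : List α) (acc : List α),
      (xs.foldl (fun acc x => PySem.List.insertBy bf x acc) acc).map f
        = (xs.map f).foldl (fun acc y => PySem.List.insertBy bf' y acc) (acc.map f) := by
  intro xs
  induction xs with
  | nil => intro acc; rfl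
  | cons x xs ih =>
      intro acc
      simp only [List.foldl_cons, List.map_cons, ih, pv_insertBy_map bf bf' f h]

theorem pv_insertBy_pairwise {α : Type} (bf : α → α → Bool)
    (hirr : ∀ a, bf a a = false)
    (htrans : ∀ a b c, bf a b = true → bf b c = true → bf a c = true)
    (x : α) (ys : List α) (h : ys.Pairwise (fun a b => bf b a = false)) :
    (PySem.List.insertBy bf x ys).Pairwise (fun a b => bf b a = false) := by
  induction ys with
  | nil => simp [PySem.List.insertBy]
  | cons y ys ih =>
      rcases List.pairwise_cons.mp h with ⟨hy, hys⟩
      simp only [PySem.List.insertBy]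
      by_cases hb : bf x y = true
      · simp only [hb, if_true]
        refine List.pairwise_cons.mpr ⟨?_, h⟩
        intro z hz
        rcases List.mem_cons.mp hz with hz | hz
        · rw [hz]
          by_cases hyx : bf y x = true
          · have := htrans y x y hyx hb
            rw [hirr y] at this; exact absurd this (by simp)
          · exact Bool.eq_false_iff.mpr hyx
        · by_cases hzx : bf z x = true
          · have := htrans z x y hzx hb
            rw [hy z hz] at this; exact absurd this (by simp)
          · exact Bool.eq_false_iff.mpr hzx
      · simp only [hb]
        refine List.pairwise_cons.mpr ⟨?_, ih hys⟩
        intro z hz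
        rcases (PySem.List.mem_insertBy _ _ _ _).mp hz with hz | hz
        · rw [hz]; exact Bool.eq_false_iff.mpr hb
        · exact hy z hz

theorem pv_insertBy_filter {α : Type} (bf : α → α → Bool) (p : α → Bool)
    (hweak : ∀ a b c, bf a b = true → bf c b = false → bf a c = true)
    (x : α) (ys : List α) (h : ys.Pairwise (fun a b => bf b a = false)) :
    (PySem.List.insertBy bf x ys).filter p
      = if p x then PySem.List.insertBy bf x (ys.filter p) else ys.filter p := by
  induction ys with
  | nil =>
      simp only [PySem.List.insertBy, List.filter]
      by_cases hp : p x = true <;> simp [hp]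
  | cons y ys ih =>
      rcases List.pairwise_cons.mp h with ⟨hy, hys⟩
      simp only [PySem.List.insertBy]
      by_cases hb : bf x y = true
      · simp only [hb, if_true]
        by_cases hp : p x = true
        · by_cases hpy : p y = true
          · simp [hp, hpy, PySem.List.insertBy, hb]
          · -- x kept, y dropped: x still goes to the very front of filter ys
            simp only [List.filter_cons, hpy, hp, if_true]
            cases hfc : ys.filter p with
            | nil => simp [PySem.List.insertBy]
            | cons z zs =>
                have hz : z ∈ ys := List.mem_of_mem_filter (hfc ▸ List.mem_cons_self)
                have hxz : bf x z = true := hweak x y z hb (hy z hz)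
                simp [PySem.List.insertBy, hxz]
        · simp [List.filter_cons, hp]
      · simp only [hb, Bool.false_eq_true, if_false]
        by_cases hpy : p y = true
        · rw [List.filter_cons_of_pos hpy, ih hys, List.filter_cons_of_pos hpy]
          by_cases hp : p x = true
          · simp [hp, PySem.List.insertBy, hb]
          · simp [hp]
        · rw [List.filter_cons_of_neg (by simp [hpy]), ih hys, List.filter_cons_of_neg (by simp [hpy])]

theorem pv_foldl_insertBy_filter {α : Type} (bf : α → α → Bool) (p : α → Bool)
    (hirr : ∀ a, bf a a = false)
    (htrans : ∀ a b c, bf a b = true → bf b c = true → bf a c = true)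
    (hweak : ∀ a b c, bf a b = true → bf c b = false → bf a c = true) :
    ∀ (xs : List α) (acc : List α), acc.Pairwise (fun a b => bf b a = false) →
      (xs.foldl (fun acc x => PySem.List.insertBy bf x acc) acc).filter p
        = (xs.filter p).foldl (fun acc x => PySem.List.insertBy bf x acc) (acc.filter p) := by
  intro xs
  induction xs with
  | nil => intro acc hacc; rfl
  | cons x xs ih =>
      intro acc hacc
      simp only [List.foldl_cons, List.filter_cons]
      rw [ih _ (pv_insertBy_pairwise bf hirr htrans x acc hacc)]
      rw [pv_insertBy_filter bf p hweak x acc hacc]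
      by_cases hp : p x = true
      · simp [hp]
      · simp [hp]

-- the concrete comparison sorted2 uses, for two Int keys
theorem pv_lt2_props {α : Type} (k1 k2 : α → Int) :
    (∀ a, (decide (k1 a < k1 a) || (!decide (k1 a < k1 a) && decide (k2 a < k2 a))) = false)
    ∧ (∀ a b c, (decide (k1 a < k1 b) || (!decide (k1 b < k1 a) && decide (k2 a < k2 b))) = true →
        (decide (k1 b < k1 c) || (!decide (k1 c < k1 b) && decide (k2 b < k2 c))) = true →
        (decide (k1 a < k1 c) || (!decide (k1 c < k1 a) && decide (k2 a < k2 c))) = true)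
    ∧ (∀ a b c, (decide (k1 a < k1 b) || (!decide (k1 b < k1 a) && decide (k2 a < k2 b))) = true →
        (decide (k1 c < k1 b) || (!decide (k1 b < k1 c) && decide (k2 c < k2 b))) = false →
        (decide (k1 a < k1 c) || (!decide (k1 c < k1 a) && decide (k2 a < k2 c))) = true) := by
  refine ⟨?_, ?_, ?_⟩ <;>
    · intros
      simp only [Bool.or_eq_true, Bool.or_eq_false_iff, Bool.and_eq_true,
        Bool.and_eq_false_iff, Bool.not_eq_true', Bool.not_eq_false',
        decide_eq_true_eq, decide_eq_false_iff_not] at *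
      omega

-- the concrete comparisons the two sorted2 calls reduce to
def pv_bfT : (Int × Int × Int) → (Int × Int × Int) → Bool := fun a b =>
  decide (-a.2.2 < -b.2.2) || (!decide (-b.2.2 < -a.2.2) && decide (a.2.1 < b.2.1))
def pv_bfP : (Int × Int) → (Int × Int) → Bool := fun a b =>
  decide (-a.2 < -b.2) || (!decide (-b.2 < -a.2) && decide (a.1 < b.1))

theorem pv_sorted2T (xs : List (Int × Int × Int)) :
    PySem.List.sorted2 xs (fun t => -t.2.2) (fun t => t.2.1)
      = xs.foldl (fun acc x => PySem.List.insertBy pv_bfT x acc) [] := rfl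

theorem pv_sorted2P (xs : List (Int × Int)) :
    PySem.List.sorted2 xs (fun x => -x.2) (fun x => x.1)
      = xs.foldl (fun acc x => PySem.List.insertBy pv_bfP x acc) [] := rfl

theorem build_transition_index_py_eq (ts : List (Int × Int × Int)) :
    build_transition_index_py ts = build_transition_index_py_alt ts := by
  obtain ⟨hirrT, htransT, hweakT⟩ := pv_lt2_props (fun t : Int × Int × Int => -t.2.2) (fun t => t.2.1)
  have hnodup : ((ts.foldl (fun d p => d.modify p.1 [] (· ++ [p.2]))
      (PySem.Dict.empty : PySem.Dict Int (List (Int × Int)))).keys).Nodup :=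
    PySem.Dict.nodup_keys_foldl_modify_key ts (fun t => t.1) [] (fun _ t v => v ++ [t.2]) _
      (by simp [PySem.Dict.keys_empty])
  have hkeys : (ts.foldl (fun d p => d.modify p.1 [] (· ++ [p.2]))
      (PySem.Dict.empty : PySem.Dict Int (List (Int × Int)))).keys
      = PySem.List.dedup (ts.map (·.1)) := by
    have h := PySem.Dict.keys_foldl_modify_key ts (fun t => t.1) ([] : List (Int × Int))
      (fun _ t v => v ++ [t.2]) PySem.Dict.empty
    simpa [PySem.Dict.keys_empty, PySem.Set.update_empty, PySem.List.dedup_eq_ofList] using h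
  show (ts.foldl (fun d p => d.modify p.1 [] (· ++ [p.2])) PySem.Dict.empty).items.map
        (fun q => (q.1, PySem.List.sorted2 q.2 (fun x => -x.2) (fun x => x.1)))
      = (PySem.List.dedup (ts.map (·.1))).map (fun s => (s,
          ((PySem.List.sorted2 ts (fun t => -t.2.2) (fun t => t.2.1)).foldl
            (fun d p => d.modify p.1 [] (· ++ [p.2])) PySem.Dict.empty).getD s []))
  rw [PySem.Dict.items_eq_map_keys _ hnodup ([] : List (Int × Int)), hkeys, List.map_map]
  apply List.map_congr_left
  intro s hs
  simp only [Function.comp_apply]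
  congr 1
  rw [PySem.Dict.getD_foldl_modify_append, PySem.Dict.getD_foldl_modify_append,
    PySem.Dict.getD_empty, List.nil_append, List.nil_append]
  rw [pv_sorted2T,
    pv_foldl_insertBy_filter pv_bfT (fun p => p.1 == s) hirrT htransT hweakT ts [] (by simp)]
  rw [pv_foldl_insertBy_map pv_bfT pv_bfP (fun t : Int × Int × Int => t.2) (fun a b => rfl)]
  rw [pv_sorted2P]
  rfl

-- ===== VERDICT (by name: the statement is the Claim_ definition above) =====
theorem build_transition_index_py_spec : Claim_equal_build_transition_index_py := by
  intro transitions _ _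
  unfold Spec_build_transition_index_py
  exact build_transition_index_py_eq transitions
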